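-- pv_equiv track=rewrite | github.com/Darepode/Milestone-2 | verification/script/generate_rv32i_asm.py | replace_here4_with_here
-- ===== SOURCE A (Python) =====
-- def replace_here4_with_here(asm_code):
--     """
--     After the line 'here4:', replace all occurrences of 'here4' with 'here',
--     except for the 'here4:' label itself.
--     """
--     updated_code = []
--     found_here4_label = False
--
--     for line in asm_code:
--         if "here4:" in line:  # Detect the 'here4:' label
--             found_here4_label = True
--             updated_code.append(line)  # Don't change the label itself
--             continue
--
--         if found_here4_label:
--             # Replace 'here4' with 'here' after 'here4:' has been found
--             line = line.replace('here4', 'here')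
--
--         updated_code.append(line)
--
--     return updated_code
-- ===== SOURCE B (Python) =====
-- def replace_here4_with_here(asm_code):
--     for i, line in enumerate(asm_code):
--         if "here4:" in line:
--             break
--     else:
--         return list(asm_code)
--     return asm_code[:i + 1] + [
--         l if "here4:" in l else l.replace("here4", "here")
--         for l in asm_code[i + 1:]
--     ]
-- ===== Notes on version B (the rewrite author's own statement) =====
-- stated objective: alternative
-- what changed: Replaces the single flag-threaded pass with an index-locate step (first line containing 'here4:') plus keeping that prefix verbatim and mapping the suffix, with no state threaded through the loop.
import Mathlib
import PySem

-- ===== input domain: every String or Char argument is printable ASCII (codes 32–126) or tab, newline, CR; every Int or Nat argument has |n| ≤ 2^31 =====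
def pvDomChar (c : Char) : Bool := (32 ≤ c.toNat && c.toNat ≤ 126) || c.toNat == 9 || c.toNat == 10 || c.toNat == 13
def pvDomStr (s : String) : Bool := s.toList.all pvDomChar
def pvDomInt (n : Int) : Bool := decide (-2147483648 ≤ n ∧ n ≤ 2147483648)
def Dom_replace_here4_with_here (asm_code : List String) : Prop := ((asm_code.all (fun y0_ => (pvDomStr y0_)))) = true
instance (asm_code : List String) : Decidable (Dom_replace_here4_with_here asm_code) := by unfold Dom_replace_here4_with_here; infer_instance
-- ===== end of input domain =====

-- B replaces A's flag-threaded single pass with locate-first-label + prefix-verbatim + map-over-suffix (alternative decomposition, same cost).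
-- ===== PORT A =====
def pvGoA (found : Bool) : List String → List String
  | [] => []
  | l :: ls =>
    if PySem.Str.isIn "here4:" l then l :: pvGoA true ls
    else (if found then PySem.Str.replace l "here4" "here" else l) :: pvGoA found ls

def replace_here4_with_here (asm_code : List String) : List String := pvGoA false asm_code

-- ===== PORT B =====
def pvFix (l : String) : String :=
  if PySem.Str.isIn "here4:" l then l else PySem.Str.replace l "here4" "here"

def replace_here4_with_here_alt (asm_code : List String) : List String :=
  match asm_code.findIdx? (fun l => PySem.Str.isIn "here4:" l) with
  | none => asm_code
  | some i => asm_code.take (i + 1) ++ (asm_code.drop (i + 1)).map pvFix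

-- ===== PRECONDITION & SPEC =====
def Spec_replace_here4_with_here (asm_code : List String) (out : List String) : Prop := out = replace_here4_with_here_alt asm_code
instance (asm_code : List String) (out : List String) : Decidable (Spec_replace_here4_with_here asm_code out) := by unfold Spec_replace_here4_with_here; infer_instance

-- ===== CLAIM (what is proved, stated in full; the proofs are below) =====
def Claim_equal_replace_here4_with_here : Prop := ∀ (asm_code : List String), Dom_replace_here4_with_here asm_code → Spec_replace_here4_with_here asm_code (replace_here4_with_here asm_code)

-- ===== LEMMAS AND PROOFS =====
theorem pvGoA_true_eq_map (ls : List String) : pvGoA true ls = ls.map pvFix := by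
  induction ls with
  | nil => rfl
  | cons l ls ih =>
    simp only [pvGoA, pvFix, List.map]
    split_ifs with h <;> simp [ih]

theorem pvGoA_false_eq_alt (ls : List String) :
    pvGoA false ls = replace_here4_with_here_alt ls := by
  induction ls with
  | nil => rfl
  | cons l ls ih =>
    simp only [replace_here4_with_here_alt] at ih ⊢
    simp only [pvGoA, List.findIdx?_cons]
    by_cases h : PySem.Str.isIn "here4:" l
    · rw [if_pos h, if_pos h]
      simp [pvGoA_true_eq_map]
    · rw [if_neg h, if_neg h]
      cases hf : ls.findIdx? (fun l => PySem.Str.isIn "here4:" l) with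
      | none => rw [hf] at ih; simp [ih]
      | some i =>
        rw [hf] at ih
        simp [ih, List.take_succ_cons, List.drop_succ_cons]

-- ===== VERDICT (by name: the statement is the Claim_ definition above) =====
theorem replace_here4_with_here_spec : Claim_equal_replace_here4_with_here := by
  intro asm_code _
  unfold Spec_replace_here4_with_here replace_here4_with_here
  exact pvGoA_false_eq_alt asm_code
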